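-- pv_equiv track=rewrite | github.com/RAIK283H/pathfinding-code-caleb-hansolo | permutation.py | get_mobile_int
-- ===== SOURCE A (Python) =====
-- def get_mobile_int(perm, directions, n):
--     # returns the next mobile integer in the permutation
--     # perm is a list of ints
--     assert perm is not None
--
--     prev = 0
--     curr = 0
--
--     for i in range(n):
--         # if the direction is True and i isnt first element, go left
--         if (directions[perm[i] - 1] == True and i != 0):
--             if (perm[i] > perm[i - 1] and perm[i] > prev):
--                 curr = perm[i]
--                 prev = curr
--         # if the direction is False and i isnt last element, go right
--         elif (directions[perm[i] - 1] == False and i != n - 1):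
--             if (perm[i] > perm[i + 1] and perm[i] > prev):
--                 curr = perm[i]
--                 prev = curr
--
--     return curr
-- ===== SOURCE B (Python) =====
-- def _mobile(perm, directions, n, i):
--     v = perm[i]
--     if directions[v - 1]:
--         return i != 0 and v > perm[i - 1]
--     return i != n - 1 and v > perm[i + 1]
--
--
-- def get_mobile_int(perm, directions, n):
--     # returns the next mobile integer in the permutation
--     assert perm is not None
--     for i in sorted(range(n), key=lambda j: perm[j], reverse=True):
--         if perm[i] > 0 and _mobile(perm, directions, n, i):
--             return perm[i]
--     return 0
-- ===== Notes on version B (the rewrite author's own statement) =====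
-- stated objective: alternative
-- what changed: Replaces A's single accumulating running-max scan (prev/curr state) by sorting the indices in descending order of their values and returning the first positive mobile value found, stateless.
import Mathlib
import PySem

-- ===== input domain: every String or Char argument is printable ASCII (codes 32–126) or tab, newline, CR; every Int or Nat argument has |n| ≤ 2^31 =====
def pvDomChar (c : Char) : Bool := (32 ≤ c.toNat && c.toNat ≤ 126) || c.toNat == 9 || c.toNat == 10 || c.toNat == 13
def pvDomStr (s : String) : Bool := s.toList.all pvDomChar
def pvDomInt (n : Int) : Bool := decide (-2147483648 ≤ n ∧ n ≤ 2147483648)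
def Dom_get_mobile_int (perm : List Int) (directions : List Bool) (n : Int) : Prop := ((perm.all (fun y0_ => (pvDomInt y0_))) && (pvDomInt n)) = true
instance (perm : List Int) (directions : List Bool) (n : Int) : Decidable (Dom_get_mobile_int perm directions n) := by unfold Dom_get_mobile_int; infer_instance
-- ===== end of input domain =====

-- B replaces A's accumulating running-max scan by sorting the indices by value descending
-- and returning the first positive mobile value (objective: alternative decomposition).

-- ===== PORT A =====
-- the body of A's for-loop, on state (prev, curr)
def pvStepA (perm : List Int) (directions : List Bool) (n : Int) (st : Int × Int) (i : Int) : Int × Int :=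
  let prev := st.1
  let curr := st.2
  let v := PySem.List.pyGetD perm i 0
  if PySem.List.pyGetD directions (v - 1) false = true ∧ i ≠ 0 then
    if v > PySem.List.pyGetD perm (i - 1) 0 ∧ v > prev then (v, v) else (prev, curr)
  else if PySem.List.pyGetD directions (v - 1) false = false ∧ i ≠ n - 1 then
    if v > PySem.List.pyGetD perm (i + 1) 0 ∧ v > prev then (v, v) else (prev, curr)
  else (prev, curr)

def get_mobile_int (perm : List Int) (directions : List Bool) (n : Int) : Int :=
  ((PySem.List.pyRange 0 n 1).foldl (pvStepA perm directions n) (0, 0)).2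

-- ===== PORT B =====
-- Source B's helper _mobile
def pvMobile (perm : List Int) (directions : List Bool) (n : Int) (i : Int) : Bool :=
  let v := PySem.List.pyGetD perm i 0
  if PySem.List.pyGetD directions (v - 1) false then
    decide (i ≠ 0 ∧ v > PySem.List.pyGetD perm (i - 1) 0)
  else
    decide (i ≠ n - 1 ∧ v > PySem.List.pyGetD perm (i + 1) 0)

-- Source B's for-loop over the sorted index list: first positive mobile value, else 0
def pvScan (perm : List Int) (directions : List Bool) (n : Int) : List Int → Int
  | [] => 0
  | i :: rest =>
    if PySem.List.pyGetD perm i 0 > 0 ∧ pvMobile perm directions n i = true then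
      PySem.List.pyGetD perm i 0
    else pvScan perm directions n rest

def get_mobile_int_alt (perm : List Int) (directions : List Bool) (n : Int) : Int :=
  pvScan perm directions n
    (PySem.List.sorted (PySem.List.pyRange 0 n 1) (fun j => PySem.List.pyGetD perm j 0) true)

-- ===== PRECONDITION & SPEC =====
-- Pre_ excludes exactly the inputs where the Python A raises IndexError: an index
-- 0 ≤ i < n outside perm, or a direction lookup perm[i]-1 outside Python's index range.
def Pre_get_mobile_int (perm : List Int) (directions : List Bool) (n : Int) : Prop :=
  n.toNat ≤ perm.length ∧
  ∀ i < n.toNat, PySem.Raise.InRange directions.length ((perm.getD i 0) - 1)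
instance (perm : List Int) (directions : List Bool) (n : Int) : Decidable (Pre_get_mobile_int perm directions n) := by unfold Pre_get_mobile_int; infer_instance

def pvWitness_get_mobile_int : List Int × List Bool × Int := ([2, 1, 3], [false, false, false], 3)

def Spec_get_mobile_int (perm : List Int) (directions : List Bool) (n : Int) (out : Int) : Prop := out = get_mobile_int_alt perm directions n
instance (perm : List Int) (directions : List Bool) (n : Int) (out : Int) : Decidable (Spec_get_mobile_int perm directions n out) := by unfold Spec_get_mobile_int; infer_instance

-- ===== CLAIM (what is proved, stated in full; the proofs are below) =====
def Claim_equal_get_mobile_int : Prop := ∀ (perm : List Int) (directions : List Bool) (n : Int), Dom_get_mobile_int perm directions n → Pre_get_mobile_int perm directions n → Spec_get_mobile_int perm directions n (get_mobile_int perm directions n)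

-- ===== LEMMAS AND PROOFS =====

-- the value one loop step contributes: v i if i is mobile with positive value, else 0
def pvScore (perm : List Int) (directions : List Bool) (n : Int) (i : Int) : Int :=
  if pvMobile perm directions n i = true ∧ PySem.List.pyGetD perm i 0 > 0
  then PySem.List.pyGetD perm i 0 else 0

theorem pvStepA_eq (perm : List Int) (directions : List Bool) (n : Int)
    (a i : Int) (ha : 0 ≤ a) :
    pvStepA perm directions n (a, a) i
      = (max a (pvScore perm directions n i), max a (pvScore perm directions n i)) := by
  unfold pvStepA pvScore pvMobile
  cases hd : PySem.List.pyGetD directions (PySem.List.pyGetD perm i 0 - 1) false <;>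
    simp only [hd] <;> split_ifs <;> simp_all <;> omega

theorem pvA_inv (perm : List Int) (directions : List Bool) (n : Int) (l : List Int)
    (a : Int) (ha : 0 ≤ a) :
    (l.foldl (pvStepA perm directions n) (a, a)).2
      = l.foldl (fun acc i => max acc (pvScore perm directions n i)) a := by
  induction l generalizing a with
  | nil => rfl
  | cons i t ih =>
    rw [List.foldl_cons, List.foldl_cons, pvStepA_eq perm directions n a i ha]
    exact ih (max a (pvScore perm directions n i)) (le_max_of_le_left ha)

theorem pvFoldMax_fix (f : Int → Int) (a : Int) (l : List Int)
    (h : ∀ j ∈ l, f j ≤ a) :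
    l.foldl (fun acc j => max acc (f j)) a = a := by
  induction l generalizing a with
  | nil => rfl
  | cons j t ih =>
    rw [List.foldl_cons]
    have : max a (f j) = a := max_eq_left (h j (by simp))
    rw [this]
    exact ih a (fun k hk => h k (by simp [hk]))

theorem pvScore_le (perm : List Int) (directions : List Bool) (n : Int) (j v : Int)
    (hv : 0 < v) (hle : PySem.List.pyGetD perm j 0 ≤ v) :
    pvScore perm directions n j ≤ v := by
  unfold pvScore; split_ifs <;> omega

theorem pvScan_eq_foldmax (perm : List Int) (directions : List Bool) (n : Int)
    (S : List Int)
    (hs : S.Pairwise (fun i j => PySem.List.pyGetD perm j 0 ≤ PySem.List.pyGetD perm i 0)) :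
    pvScan perm directions n S
      = S.foldl (fun acc i => max acc (pvScore perm directions n i)) 0 := by
  induction S with
  | nil => rfl
  | cons i t ih =>
    have hp := (List.pairwise_cons.mp hs).1
    have ht := (List.pairwise_cons.mp hs).2
    rw [pvScan, List.foldl_cons]
    split_ifs with h
    · have hscore : pvScore perm directions n i = PySem.List.pyGetD perm i 0 := by
        unfold pvScore; simp [h.1, h.2]
      rw [hscore, max_eq_right (le_of_lt h.1)]
      exact (pvFoldMax_fix _ _ t (fun j hj =>
        pvScore_le perm directions n j _ h.1 (hp j hj))).symm
    · have hscore : pvScore perm directions n i = 0 := by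
        unfold pvScore
        split_ifs with h2
        · exact absurd ⟨h2.2, h2.1⟩ h
        · rfl
      rw [hscore, max_self]
      exact ih ht

theorem pvFoldMax_perm (f : Int → Int) (l₁ l₂ : List Int) (h : l₁.Perm l₂) (a : Int) :
    l₁.foldl (fun acc i => max acc (f i)) a = l₂.foldl (fun acc i => max acc (f i)) a := by
  induction h generalizing a with
  | nil => rfl
  | cons x _ ih => simp only [List.foldl_cons]; exact ih _
  | swap x y l =>
    simp only [List.foldl_cons]
    have : max (max a (f y)) (f x) = max (max a (f x)) (f y) := by
      rw [max_assoc, max_comm (f y) (f x), ← max_assoc]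
    rw [this]
  | trans _ _ ih₁ ih₂ => exact (ih₁ a).trans (ih₂ a)

-- ===== VERDICT (by name: the statement is the Claim_ definition above) =====
theorem get_mobile_int_spec : Claim_equal_get_mobile_int := by
  intro perm directions n _ _
  unfold Spec_get_mobile_int get_mobile_int get_mobile_int_alt
  rw [pvA_inv perm directions n _ 0 le_rfl]
  rw [pvScan_eq_foldmax perm directions n _
    (PySem.List.sorted_pairwise_rev (PySem.List.pyRange 0 n 1)
      (fun j => PySem.List.pyGetD perm j 0))]
  exact pvFoldMax_perm _ _ _
    (PySem.List.sorted_perm (PySem.List.pyRange 0 n 1)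
      (fun j => PySem.List.pyGetD perm j 0) true).symm 0
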